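-- pv_equiv track=rewrite | github.com/chisadaniel/Chisa-Daniel-Projects | Python Homeworks(Numerical Calculus)/H1.py | sum_linii_B
-- ===== SOURCE A (Python) =====
-- import math
--
-- def sau_pe_linie(linie1, linie2):
--
--     result = list()
--     for i, elem in enumerate(linie1):
--         result.append(elem | linie2[i])
--     return result
--
-- def sum_linii_B(matrix, n, m):
--
--     rez = list()
--     rez.append([0] * n)
--     for j in range(1, 2 ** m):
--         k = math.floor(math.log2(j))
--         linie = sau_pe_linie(rez[j - 2 ** k], matrix[k])
--         rez.append(linie)
--     return rez
-- ===== SOURCE B (Python) =====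
-- def sum_linii_B(matrix, n, m):
--     rez = []
--     for j in range(2 ** m):
--         acc = [0] * n
--         t, k = j, 0
--         while t:
--             if t & 1:
--                 acc = [a | b for a, b in zip(acc, matrix[k])]
--             t >>= 1
--             k += 1
--         rez.append(acc)
--     return rez
-- ===== Notes on version B (the rewrite author's own statement) =====
-- stated objective: alternative
-- what changed: A fills row j by a DP recurrence reusing the stored row j - 2**floor(log2(j)); B builds every row independently from scratch by OR-ing matrix[k] for each set bit k of j, dropping both the result table reuse and the log2 call.
import Mathlib
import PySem

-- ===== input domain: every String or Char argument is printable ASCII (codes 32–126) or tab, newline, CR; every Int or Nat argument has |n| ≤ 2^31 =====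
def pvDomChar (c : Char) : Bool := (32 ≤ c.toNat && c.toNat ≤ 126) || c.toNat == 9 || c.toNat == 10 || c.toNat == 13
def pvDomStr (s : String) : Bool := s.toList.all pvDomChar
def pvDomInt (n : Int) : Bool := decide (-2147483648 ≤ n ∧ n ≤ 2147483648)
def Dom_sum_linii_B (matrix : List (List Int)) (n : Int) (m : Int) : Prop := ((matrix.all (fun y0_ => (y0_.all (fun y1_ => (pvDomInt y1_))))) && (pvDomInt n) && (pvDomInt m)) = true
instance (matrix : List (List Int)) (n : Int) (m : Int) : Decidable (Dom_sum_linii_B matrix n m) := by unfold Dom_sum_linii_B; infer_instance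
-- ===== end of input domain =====

-- B replaces A's dynamic-programming recurrence (row j built from the previously stored
-- row j - 2^floor(log2 j)) by building each row independently from j's set bits; objective:
-- alternative (same exact output, no reuse of earlier rows, no log2).

-- ===== PORT A =====
-- math.floor(math.log2(j)) is ported as Nat.log2 j (exact wherever the float computation
-- floors correctly, i.e. on all feasibly-sized inputs).
def sau_pe_linie (linie1 linie2 : List Int) : List Int :=
  (PySem.List.enumerate linie1).foldl
    (fun result p => result ++ [PySem.Int.bor p.2 ((PySem.List.pyGet? linie2 p.1).getD 0)]) []

def sum_linii_B (matrix : List (List Int)) (n : Int) (m : Int) : List (List Int) :=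
  (PySem.List.pyRange 1 (2 ^ m.toNat) 1).foldl
    (fun rez j =>
      let k : Nat := Nat.log2 j.toNat
      let linie := sau_pe_linie ((PySem.List.pyGet? rez (j - 2 ^ k)).getD [])
                                ((PySem.List.pyGet? matrix (k : Int)).getD [])
      rez ++ [linie])
    [List.replicate n.toNat 0]

-- ===== PORT B =====
def pvOrRow (acc row : List Int) : List Int := (acc.zip row).map (fun p => PySem.Int.bor p.1 p.2)

-- the 'while t: if t & 1: acc = OR-zip; t >>= 1; k += 1' loop
def pvBuildRow (matrix : List (List Int)) (acc : List Int) (t k : Nat) : List Int :=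
  if t = 0 then acc
  else pvBuildRow matrix
    (if t % 2 = 1 then pvOrRow acc ((PySem.List.pyGet? matrix (k : Int)).getD []) else acc)
    (t / 2) (k + 1)
termination_by t
decreasing_by omega

def sum_linii_B_alt (matrix : List (List Int)) (n : Int) (m : Int) : List (List Int) :=
  (PySem.List.pyRange 0 (2 ^ m.toNat) 1).foldl
    (fun rez j => rez ++ [pvBuildRow matrix (List.replicate n.toNat 0) j.toNat 0]) []

-- ===== PRECONDITION & SPEC =====
-- Pre_ excludes exactly the inputs where the Python A raises: m < 0 (2**m is a float, so
-- range raises TypeError), fewer than m rows (matrix[k] IndexError), or one of the first m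
-- rows shorter than n (linie2[i] IndexError in sau_pe_linie).
def Pre_sum_linii_B (matrix : List (List Int)) (n : Int) (m : Int) : Prop :=
  0 ≤ m ∧ m ≤ (matrix.length : Int) ∧ ∀ row ∈ matrix.take m.toNat, n ≤ (row.length : Int)
instance (matrix : List (List Int)) (n : Int) (m : Int) : Decidable (Pre_sum_linii_B matrix n m) := by unfold Pre_sum_linii_B; infer_instance

def pvWitness_sum_linii_B : List (List Int) × Int × Int := ([[1, 2], [4, 8]], 2, 2)

def Spec_sum_linii_B (matrix : List (List Int)) (n : Int) (m : Int) (out : List (List Int)) : Prop := out = sum_linii_B_alt matrix n m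
instance (matrix : List (List Int)) (n : Int) (m : Int) (out : List (List Int)) : Decidable (Spec_sum_linii_B matrix n m out) := by unfold Spec_sum_linii_B; infer_instance

-- ===== CLAIM (what is proved, stated in full; the proofs are below) =====
def Claim_equal_sum_linii_B : Prop := ∀ (matrix : List (List Int)) (n : Int) (m : Int), Dom_sum_linii_B matrix n m → Pre_sum_linii_B matrix n m → Spec_sum_linii_B matrix n m (sum_linii_B matrix n m)

-- ===== LEMMAS AND PROOFS =====

-- canonical description of row j: strip the highest set bit of j
def specRow (matrix : List (List Int)) (nn : Nat) : Nat → List Int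
  | 0 => List.replicate nn 0
  | (j+1) => sau_pe_linie (specRow matrix nn ((j+1) - 2 ^ Nat.log2 (j+1)))
      ((PySem.List.pyGet? matrix ((Nat.log2 (j+1) : Int))).getD [])
termination_by j => j
decreasing_by
  have : 1 ≤ 2 ^ Nat.log2 (j+1) := Nat.one_le_two_pow
  have : 2 ^ Nat.log2 (j+1) ≤ j + 1 := Nat.log2_self_le (by omega)
  omega

theorem sau_eq_map (l1 l2 : List Int) :
    sau_pe_linie l1 l2 =
      (PySem.List.enumerate l1).map (fun p => PySem.Int.bor p.2 ((PySem.List.pyGet? l2 p.1).getD 0)) := by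
  simpa [sau_pe_linie] using
    PySem.List.foldl_append_singleton_eq_map
      (l := PySem.List.enumerate l1)
      (f := fun p => PySem.Int.bor p.2 ((PySem.List.pyGet? l2 p.1).getD 0)) (acc := [])

theorem length_sau (l1 l2 : List Int) : (sau_pe_linie l1 l2).length = l1.length := by
  simp [sau_eq_map, PySem.List.length_enumerate]

theorem sau_eq_orRow (l1 l2 : List Int) (h : l1.length ≤ l2.length) :
    sau_pe_linie l1 l2 = pvOrRow l1 l2 := by
  rw [sau_eq_map]
  apply List.ext_getElem
  · simp [pvOrRow, PySem.List.length_enumerate]; omega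
  · intro i h1 h2
    have hi : i < l1.length := by
      simpa [PySem.List.length_enumerate] using h1
    simp only [List.getElem_map, PySem.List.getElem_enumerate, pvOrRow, List.getElem_zip]
    have hg : PySem.List.pyGet? l2 ((0 : Int) + i) = some l2[i] := by
      have := PySem.List.pyGet?_natCast (xs := l2) (n := i)
      simp_all [List.getElem?_eq_getElem (by omega : i < l2.length)]
    simp [List.getElem?_eq_getElem (show i < l2.length by omega)]

theorem length_specRow (matrix : List (List Int)) (nn : Nat) (j : Nat) :
    (specRow matrix nn j).length = nn := by
  induction j using Nat.strong_induction_on with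
  | _ j ih =>
    match j with
    | 0 => simp [specRow]
    | (j+1) =>
      rw [specRow, length_sau]
      apply ih
      have : 1 ≤ 2 ^ Nat.log2 (j+1) := Nat.one_le_two_pow
      omega

theorem log2_odd (s : Nat) (h : 1 ≤ s) : Nat.log2 (2*s+1) = Nat.log2 s + 1 := by
  have h1 : 2 ^ Nat.log2 s ≤ s := Nat.log2_self_le (by omega)
  have h2 : s.log2 < Nat.log2 s + 1 := Nat.lt_succ_self _
  have h3 : s < 2 ^ (Nat.log2 s + 1) := (Nat.log2_lt (by omega)).mp h2
  rw [Nat.log2_eq_iff (by omega)]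
  constructor
  · simp [Nat.pow_succ]; omega
  · simp [Nat.pow_succ]; omega

theorem log2_even (s : Nat) (h : 1 ≤ s) : Nat.log2 (2*s) = Nat.log2 s + 1 :=
  Nat.log2_two_mul (by omega)

theorem pvBuildRow_zero (matrix : List (List Int)) (acc : List Int) (k : Nat) :
    pvBuildRow matrix acc 0 k = acc := by
  rw [pvBuildRow]; simp

theorem pvBuildRow_even (matrix : List (List Int)) (acc : List Int) (u k : Nat) :
    pvBuildRow matrix acc (2*u) k = pvBuildRow matrix acc u (k+1) := by
  rcases Nat.eq_zero_or_pos u with h | h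
  · subst h; rw [pvBuildRow_zero, pvBuildRow_zero]
  · rw [pvBuildRow]
    have h0 : ¬ (2*u = 0) := by omega
    have h1 : (2*u) % 2 = 0 := by omega
    have h2 : (2*u) / 2 = u := by omega
    simp [h0, h1, h2]

theorem pvBuildRow_one (matrix : List (List Int)) (acc : List Int) (k : Nat) :
    pvBuildRow matrix acc 1 k =
      pvOrRow acc ((PySem.List.pyGet? matrix (k : Int)).getD []) := by
  rw [pvBuildRow]
  simp [pvBuildRow_zero]

theorem pvBuildRow_odd (matrix : List (List Int)) (acc : List Int) (u k : Nat) :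
    pvBuildRow matrix acc (2*u+1) k =
      pvBuildRow matrix (pvOrRow acc ((PySem.List.pyGet? matrix (k : Int)).getD [])) u (k+1) := by
  rw [pvBuildRow]
  have h1 : (2*u+1) % 2 = 1 := by omega
  have h2 : (2*u+1) / 2 = u := by omega
  simp [h1, h2]

-- peel off the HIGHEST set bit of t (the loop itself peels the lowest)
theorem pvBuildRow_strip_top (matrix : List (List Int)) :
    ∀ t, 1 ≤ t → ∀ (acc : List Int) (k : Nat),
      pvBuildRow matrix acc t k =
        pvOrRow (pvBuildRow matrix acc (t - 2 ^ Nat.log2 t) k)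
          ((PySem.List.pyGet? matrix ((k + Nat.log2 t : Nat) : Int)).getD []) := by
  intro t
  induction t using Nat.strong_induction_on with
  | _ t ih =>
    intro ht acc k
    rcases Nat.even_or_odd t with ⟨s, hs⟩ | ⟨s, hs⟩
    · -- t = 2*s, s ≥ 1
      have hs2 : t = 2*s := by omega
      clear hs; subst hs2
      have hs1 : 1 ≤ s := by omega
      have hpow : 2 ^ Nat.log2 s ≤ s := Nat.log2_self_le (by omega)
      rw [log2_even s hs1, pvBuildRow_even]
      have hlt : s < 2*s := by omega
      rw [ih s hlt hs1 acc (k+1)]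
      have harg : 2 * s - 2 ^ (Nat.log2 s + 1) = 2 * (s - 2 ^ Nat.log2 s) := by
        rw [Nat.pow_succ]; omega
      rw [harg, pvBuildRow_even]
      have hk : k + 1 + Nat.log2 s = k + (Nat.log2 s + 1) := by omega
      rw [hk]
    · -- t = 2*s+1
      subst hs
      rcases Nat.eq_zero_or_pos s with h0 | hs1
      · subst h0
        simp only [Nat.mul_zero, Nat.zero_add]
        have h1 : Nat.log2 1 = 0 := by decide
        rw [h1, pvBuildRow_one]
        rw [show (1 - 2^0 : Nat) = 0 from rfl, pvBuildRow_zero]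
        rw [show k + 0 = k from rfl]
      · have hpow : 2 ^ Nat.log2 s ≤ s := Nat.log2_self_le (by omega)
        rw [log2_odd s hs1, pvBuildRow_odd]
        have hlt : s < 2*s+1 := by omega
        rw [ih s hlt hs1 _ (k+1)]
        have harg : 2 * s + 1 - 2 ^ (Nat.log2 s + 1) = 2 * (s - 2 ^ Nat.log2 s) + 1 := by
          rw [Nat.pow_succ]; omega
        rw [harg, pvBuildRow_odd]
        have hk : k + 1 + Nat.log2 s = k + (Nat.log2 s + 1) := by omega
        rw [hk]

theorem pvBuildRow_eq_specRow (matrix : List (List Int)) (nn mm : Nat)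
    (hrows : ∀ k, k < mm → nn ≤ ((PySem.List.pyGet? matrix (k : Int)).getD []).length) :
    ∀ j, j < 2 ^ mm → pvBuildRow matrix (List.replicate nn 0) j 0 = specRow matrix nn j := by
  intro j
  induction j using Nat.strong_induction_on with
  | _ j ih =>
    intro hj
    match j with
    | 0 => rw [pvBuildRow_zero]; simp [specRow]
    | (j+1) =>
      have hne : (j+1) ≠ 0 := by omega
      have hpow : 2 ^ Nat.log2 (j+1) ≤ j+1 := Nat.log2_self_le hne
      have hone : 1 ≤ 2 ^ Nat.log2 (j+1) := Nat.one_le_two_pow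
      have hklt : Nat.log2 (j+1) < mm := (Nat.log2_lt hne).mpr hj
      rw [pvBuildRow_strip_top matrix (j+1) (by omega)]
      rw [ih ((j+1) - 2 ^ Nat.log2 (j+1)) (by omega) (by omega)]
      rw [specRow]
      rw [sau_eq_orRow]
      · simp
      · rw [length_specRow]
        exact hrows _ hklt

theorem sumA_eq_map (matrix : List (List Int)) (nn N : Nat) :
    (PySem.List.pyRange 1 (1 + (N : Int)) 1).foldl
      (fun rez j =>
        let k : Nat := Nat.log2 j.toNat
        let linie := sau_pe_linie ((PySem.List.pyGet? rez (j - 2 ^ k)).getD [])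
                                  ((PySem.List.pyGet? matrix (k : Int)).getD [])
        rez ++ [linie])
      [List.replicate nn 0]
    = (List.range (1 + N)).map (specRow matrix nn) := by
  induction N with
  | zero =>
    rw [PySem.List.pyRange_one_eq_nil (by omega)]
    simp [specRow]
  | succ N ihN =>
    have hcast : (1 + ((N+1 : Nat) : Int)) = (1 + (N : Int)) + 1 := by push_cast; ring
    rw [hcast, PySem.List.pyRange_one_succ_right (by omega : (1:Int) ≤ 1 + (N : Int)),
      List.foldl_append, ihN]
    simp only [List.foldl_cons, List.foldl_nil]
    have htoNat : ((1 : Int) + (N : Int)).toNat = 1 + N := by omega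
    have hc : 2 ^ Nat.log2 (1+N) ≤ 1 + N := Nat.log2_self_le (by omega)
    have hidx : (1 + (N : Int)) - 2 ^ Nat.log2 (1+N) = (((1+N) - 2 ^ Nat.log2 (1+N) : Nat) : Int) := by
      push_cast [hc]; ring
    have hget : PySem.List.pyGet?
        ((List.range (1 + N)).map (specRow matrix nn))
        ((1 + (N : Int)) - 2 ^ Nat.log2 (1+N))
        = some (specRow matrix nn ((1+N) - 2 ^ Nat.log2 (1+N))) := by
      rw [hidx, PySem.List.pyGet?_natCast]
      have hlt : (1+N) - 2 ^ Nat.log2 (1+N) < 1 + N := by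
        have : 1 ≤ 2 ^ Nat.log2 (1+N) := Nat.one_le_two_pow
        omega
      simp [hlt]
    simp only [htoNat, hget, Option.getD_some]
    rw [show (1 + (N+1)) = (1+N)+1 from by omega, List.range_succ, List.map_append]
    congr 1
    have hEq : ∀ j : Nat, specRow matrix nn (j+1)
        = sau_pe_linie (specRow matrix nn ((j+1) - 2 ^ Nat.log2 (j+1)))
          ((PySem.List.pyGet? matrix ((Nat.log2 (j+1) : Int))).getD []) := by
      intro j; rw [specRow]
    rw [show (1+N) = N+1 from by omega]
    simp only [List.map_cons, List.map_nil]
    rw [hEq N]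

theorem sumB_eq_map (matrix : List (List Int)) (nn N : Nat) :
    (PySem.List.pyRange 0 ((N : Int)) 1).foldl
      (fun rez j => rez ++ [pvBuildRow matrix (List.replicate nn 0) j.toNat 0]) []
    = (List.range N).map (fun j => pvBuildRow matrix (List.replicate nn 0) j 0) := by
  rw [PySem.List.foldl_append_singleton_eq_map]
  rw [PySem.List.pyRange_one]
  simp only [List.map_map]
  apply List.map_congr_left
  intro a ha
  simp only [Function.comp]
  congr 1
  omega

-- ===== VERDICT (by name: the statement is the Claim_ definition above) =====
theorem sum_linii_B_spec : Claim_equal_sum_linii_B := by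
  intro matrix n m _hdom hpre
  obtain ⟨hm0, hmlen, hrows⟩ := hpre
  unfold Spec_sum_linii_B
  unfold sum_linii_B sum_linii_B_alt
  have hN : (2 ^ m.toNat : Int) = 1 + ((2 ^ m.toNat - 1 : Nat) : Int) := by
    have : 1 ≤ 2 ^ m.toNat := Nat.one_le_two_pow
    push_cast [this]; omega
  conv_lhs => rw [hN]
  rw [sumA_eq_map matrix n.toNat]
  have hN2 : (2 ^ m.toNat : Int) = ((2 ^ m.toNat : Nat) : Int) := by push_cast; ring
  conv_rhs => rw [hN2]
  rw [sumB_eq_map]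
  have hrange : 1 + (2 ^ m.toNat - 1) = 2 ^ m.toNat := by
    have : 1 ≤ 2 ^ m.toNat := Nat.one_le_two_pow
    omega
  rw [hrange]
  apply List.map_congr_left
  intro j hj
  rw [List.mem_range] at hj
  rw [pvBuildRow_eq_specRow matrix n.toNat m.toNat _ j hj]
  intro k hk
  have hk2 : k < matrix.length := by omega
  have hget : PySem.List.pyGet? matrix (k : Int) = some matrix[k] := by
    rw [PySem.List.pyGet?_natCast]
    simp [List.getElem?_eq_getElem hk2]
  rw [hget]
  simp only [Option.getD_some]
  have hmem : matrix[k] ∈ matrix.take m.toNat := by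
    rw [List.mem_take_iff_getElem]
    exact ⟨k, by omega, by simp⟩
  have := hrows _ hmem
  omega
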